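-- pv_equiv track=rewrite | github.com/Xiong-Alex/LeetCode | 504-base-7/base-7.py | convertToBase7
-- ===== SOURCE A (Python) =====
-- def convertToBase7(num: int) -> str:
--
--     if num == 0:
--         return str(num)
--
--     sign = "-" if num < 0 else ""
--     num = abs(num)
--
--     result = ""
--
--     while num > 0:
--         result = str(num % 7) + result
--         num //= 7
--
--     return sign + result
-- ===== SOURCE B (Python) =====
-- def convertToBase7(num: int) -> str:
--     if num < 0:
--         return "-" + convertToBase7(-num)
--     p = 1
--     while p * 7 <= num:
--         p *= 7
--     out = []
--     while p > 0:
--         out.append(chr(ord('0') + num // p))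
--         num %= p
--         p //= 7
--     return ''.join(out)
-- ===== Notes on version B (the rewrite author's own statement) =====
-- stated objective: alternative
-- what changed: Instead of A's LSB-first while-loop that prepends digit strings to an accumulator, B first finds the largest base power not exceeding the magnitude and then emits digits most-significant-first by dividing by decreasing powers, collecting characters in a list and joining once; the sign is handled by a single recursive call.
import Mathlib
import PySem

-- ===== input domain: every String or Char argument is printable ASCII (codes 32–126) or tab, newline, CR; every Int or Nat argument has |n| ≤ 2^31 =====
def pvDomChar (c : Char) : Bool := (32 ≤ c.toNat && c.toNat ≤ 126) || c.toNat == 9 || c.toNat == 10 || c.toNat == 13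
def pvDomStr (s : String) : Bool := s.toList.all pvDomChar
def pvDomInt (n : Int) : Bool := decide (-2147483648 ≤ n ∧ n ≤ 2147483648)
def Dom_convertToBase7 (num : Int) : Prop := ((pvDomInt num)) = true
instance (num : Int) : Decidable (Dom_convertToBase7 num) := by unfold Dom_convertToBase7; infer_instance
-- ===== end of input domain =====

-- B replaces A's LSB-first loop (prepending digit strings) by a power-of-7 scan:
-- find the largest power of 7 ≤ |num|, then emit digits MSB-first by dividing by
-- decreasing powers. Different algorithm, same cost.

-- ===== PORT A =====
-- A's loop runs on num after `num = abs(num)`, so the loop variable is a nonnegative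
-- integer; the port carries it as a Nat (Python's // and % on nonnegative ints with
-- positive divisor coincide with Nat / and %, so this is exact on the reachable states).
def pvLoopA (n : Nat) (result : String) : String :=
  if n > 0 then pvLoopA (n / 7) (PySem.Int.toStr ((n % 7 : Nat) : Int) ++ result)
  else result
termination_by n
decreasing_by exact Nat.div_lt_self (by omega) (by omega)

def convertToBase7 (num : Int) : String :=
  if num = 0 then PySem.Int.toStr num
  else
    let sign : String := if num < 0 then "-" else ""
    sign ++ pvLoopA num.natAbs ""

-- ===== PORT B =====
-- B runs on nonnegative ints only (the wrapper strips the sign), so the two loops are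
-- carried on Nat; `0 < p` in pvFindPowB's guard is a totality guard (p starts at 1 and
-- only grows, so it always holds on reachable states).
def pvFindPowB (num p : Nat) : Nat :=
  if _h : p * 7 ≤ num ∧ 0 < p then pvFindPowB num (p * 7) else p
termination_by num - p
decreasing_by omega

-- `out.append(chr(ord('0') + num // p))` collects one character per step; ''.join(out)
-- at the wrapper is String.ofList of the collected characters.
def pvEmitB (num p : Nat) : List Char :=
  if h : 0 < p then Char.ofNat (48 + num / p) :: pvEmitB (num % p) (p / 7)
  else []
termination_by p
decreasing_by exact Nat.div_lt_self h (by omega)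

def convertToBase7_alt (num : Int) : String :=
  if h : num < 0 then "-" ++ convertToBase7_alt (-num)
  else String.ofList (pvEmitB num.toNat (pvFindPowB num.toNat 1))
termination_by num.natAbs + (if num < 0 then 1 else 0)
decreasing_by simp [h]; omega

-- ===== PRECONDITION & SPEC =====
def Spec_convertToBase7 (num : Int) (out : String) : Prop := out = convertToBase7_alt num
instance (num : Int) (out : String) : Decidable (Spec_convertToBase7 num out) := by unfold Spec_convertToBase7; infer_instance

-- ===== CLAIM (what is proved, stated in full; the proofs are below) =====
def Claim_equal_convertToBase7 : Prop := ∀ (num : Int), Dom_convertToBase7 num → Spec_convertToBase7 num (convertToBase7 num)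

-- ===== LEMMAS AND PROOFS =====

-- MSB-first digit list of n (empty for 0), the common reference of both ports.
def pvRep (n : Nat) : List Char :=
  if n = 0 then [] else pvRep (n / 7) ++ [Char.ofNat (48 + n % 7)]
termination_by n
decreasing_by exact Nat.div_lt_self (by omega) (by omega)

theorem pvDigitStr (d : Nat) (hd : d < 7) :
    PySem.Int.toStr ((d : Nat) : Int) = String.ofList [Char.ofNat (48 + d)] := by
  interval_cases d <;> decide

theorem pvLoopA_eq_rep (n : Nat) : ∀ acc : String, pvLoopA n acc = String.ofList (pvRep n) ++ acc := by
  induction n using Nat.strong_induction_on with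
  | _ n ih =>
    intro acc
    by_cases h : n = 0
    · subst h; rw [pvLoopA, pvRep]; simp
    · rw [pvLoopA, pvRep]
      simp only [Nat.pos_of_ne_zero h, if_pos, if_neg h]
      rw [ih (n / 7) (Nat.div_lt_self (Nat.pos_of_ne_zero h) (by omega))]
      rw [pvDigitStr (n % 7) (Nat.mod_lt _ (by omega))]
      rw [String.ofList_append, String.append_assoc]

-- fixed-width MSB-first digits: dfix k n = the k+1 base-7 digits of n (n < 7^(k+1))
def pvDfix : Nat → Nat → List Char
  | 0, n => [Char.ofNat (48 + n)]
  | k + 1, n => Char.ofNat (48 + n / 7 ^ (k + 1)) :: pvDfix k (n % 7 ^ (k + 1))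

theorem pvEmitB_eq_dfix (k : Nat) : ∀ n, n < 7 ^ (k + 1) → pvEmitB n (7 ^ k) = pvDfix k n := by
  induction k with
  | zero =>
    intro n hn
    rw [pvEmitB]
    simp only [pow_zero, Nat.lt_one_iff, Nat.div_one, Nat.mod_one]
    rw [pvEmitB]
    simp [pvDfix]
  | succ k ih =>
    intro n hn
    rw [pvEmitB]
    have hp : 0 < 7 ^ (k + 1) := Nat.pow_pos (by omega)
    simp only [hp, dif_pos]
    rw [show 7 ^ (k + 1) / 7 = 7 ^ k by rw [pow_succ]; exact Nat.mul_div_cancel _ (by omega)]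
    rw [ih (n % 7 ^ (k + 1)) (Nat.mod_lt _ hp)]
    rfl

-- peeling the last digit: k+1-wide digits of n = k-wide digits of n/7 followed by n%7
theorem pvDfix_peel (k : Nat) : ∀ n, pvDfix (k + 1) n = pvDfix k (n / 7) ++ [Char.ofNat (48 + n % 7)] := by
  induction k with
  | zero =>
    intro n
    simp [pvDfix, pow_one]
  | succ k ih =>
    intro n
    show Char.ofNat (48 + n / 7 ^ (k + 2)) :: pvDfix (k + 1) (n % 7 ^ (k + 2)) = _
    rw [ih (n % 7 ^ (k + 2))]
    have h1 : n % 7 ^ (k + 2) % 7 = n % 7 :=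
      Nat.mod_mod_of_dvd n (dvd_pow_self 7 (by omega))
    have h2 : n % 7 ^ (k + 2) / 7 = n / 7 % 7 ^ (k + 1) := by
      rw [show (7 : Nat) ^ (k + 2) = 7 * 7 ^ (k + 1) by ring]
      exact Nat.mod_mul_right_div_self n 7 (7 ^ (k + 1))
    have h3 : n / 7 / 7 ^ (k + 1) = n / 7 ^ (k + 2) := by
      rw [Nat.div_div_eq_div_mul]; ring_nf
    rw [h1, h2]
    show Char.ofNat (48 + n / 7 ^ (k + 2)) :: _ = Char.ofNat (48 + n / 7 / 7 ^ (k + 1)) :: _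
    rw [h3]
    simp

theorem pvDfix_eq_rep (k : Nat) : ∀ n, 7 ^ k ≤ n → n < 7 ^ (k + 1) → pvDfix k n = pvRep n := by
  induction k with
  | zero =>
    intro n h1 h2
    norm_num at h1 h2
    rw [pvRep, if_neg (by omega : ¬ n = 0), Nat.div_eq_of_lt h2, pvRep]
    simp [pvDfix, Nat.mod_eq_of_lt h2]
  | succ k ih =>
    intro n h1 h2
    rw [pvDfix_peel]
    have hn7 : 7 ^ k ≤ n / 7 := Nat.le_div_iff_mul_le (by omega) |>.mpr (by rw [← pow_succ]; exact h1)
    have hn7' : n / 7 < 7 ^ (k + 1) := Nat.div_lt_iff_lt_mul (by omega) |>.mpr (by rw [← pow_succ]; exact h2)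
    rw [ih (n / 7) hn7 hn7']
    conv_rhs => rw [pvRep]
    rw [if_neg (show ¬ n = 0 by have : 0 < 7 ^ (k + 1) := Nat.pow_pos (by omega); omega)]

theorem pvFindPowB_spec (n : Nat) : ∀ m p, n - p ≤ m → 0 < p → p ≤ n →
    ∃ k, pvFindPowB n p = p * 7 ^ k ∧ p * 7 ^ k ≤ n ∧ n < p * 7 ^ (k + 1) := by
  intro m
  induction m with
  | zero =>
    intro p hle hp hpn
    rw [pvFindPowB, dif_neg (by omega)]
    exact ⟨0, by simp, by simpa using hpn, by simp; omega⟩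
  | succ m ih =>
    intro p hle hp hpn
    rw [pvFindPowB]
    by_cases hc : p * 7 ≤ n ∧ 0 < p
    · rw [dif_pos hc]
      obtain ⟨k, hres, hl, hr⟩ := ih (p * 7) (by omega) (by omega) hc.1
      refine ⟨k + 1, ?_, ?_, ?_⟩
      · rw [hres]; ring
      · calc p * 7 ^ (k + 1) = p * 7 * 7 ^ k := by ring
          _ ≤ n := hl
      · calc n < p * 7 * 7 ^ (k + 1) := hr
          _ = p * 7 ^ (k + 1 + 1) := by ring
    · rw [dif_neg hc]
      exact ⟨0, by simp, by simpa using hpn, by simp; omega⟩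

theorem pvB_core (n : Nat) (hn : 0 < n) :
    pvEmitB n (pvFindPowB n 1) = pvRep n := by
  obtain ⟨k, hres, hle, hlt⟩ := pvFindPowB_spec n (n - 1) 1 (le_refl _) (by omega) hn
  simp only [one_mul] at hres hle hlt
  rw [hres, pvEmitB_eq_dfix k n hlt, pvDfix_eq_rep k n hle hlt]

theorem pvB_zero : pvEmitB 0 (pvFindPowB 0 1) = [Char.ofNat 48] := by
  rw [pvFindPowB, dif_neg (by omega), pvEmitB, dif_pos (by omega), pvEmitB, dif_neg (by omega)]

theorem convertToBase7_spec : Claim_equal_convertToBase7 := by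
  intro num _
  unfold Spec_convertToBase7
  by_cases h0 : num = 0
  · subst h0
    rw [convertToBase7, if_pos rfl, convertToBase7_alt, dif_neg (by omega)]
    rw [show ((0 : Int).toNat) = 0 from rfl, pvB_zero]
    decide
  · rw [convertToBase7, if_neg h0]
    by_cases hneg : num < 0
    · rw [convertToBase7_alt, dif_pos hneg, convertToBase7_alt, dif_neg (by omega)]
      rw [pvLoopA_eq_rep]
      have ht : (-num).toNat = num.natAbs := by omega
      rw [ht, pvB_core num.natAbs (by omega)]
      simp [hneg]
    · rw [convertToBase7_alt, dif_neg hneg]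
      rw [pvLoopA_eq_rep]
      have ht : num.toNat = num.natAbs := by omega
      rw [ht, pvB_core num.natAbs (by omega)]
      simp [hneg]
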